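-- pv_equiv track=rewrite | github.com/kimye752-create/United_Indonesia | utils/id_ekatalog_crawler.py | compute_price_stats
-- ===== SOURCE A (Python) =====
-- from typing import Any
--
-- def compute_price_stats(rows: list[dict[str, Any]]) -> dict[str, Any]:
--     """조달가 통계 (최저/최고/중간값) 산출."""
--     prices = [r["price_idr"] for r in rows if r.get("price_idr", 0) > 0]
--     if not prices:
--         return {"min": None, "max": None, "median": None, "count": 0}
--     prices_sorted = sorted(prices)
--     n = len(prices_sorted)
--     median = (
--         prices_sorted[n // 2]
--         if n % 2
--         else (prices_sorted[n // 2 - 1] + prices_sorted[n // 2]) // 2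
--     )
--     return {
--         "min":    prices_sorted[0],
--         "max":    prices_sorted[-1],
--         "median": median,
--         "count":  n,
--     }
-- ===== SOURCE B (Python) =====
-- def _select(xs, k):
--     """k-th smallest (0-based) of non-empty xs, by iterative median-of-three quickselect."""
--     while True:
--         a, b, c = xs[0], xs[len(xs) // 2], xs[-1]
--         p = a + b + c - min(a, b, c) - max(a, b, c)
--         lt = [x for x in xs if x < p]
--         if k < len(lt):
--             xs = lt
--             continue
--         n_le = len(lt) + xs.count(p)
--         if k < n_le:
--             return p
--         xs = [x for x in xs if x > p]
--         k -= n_le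
--
-- def compute_price_stats(rows: list[dict[str, object]]) -> dict[str, object]:
--     """조달가 통계 (최저/최고/중간값) 산출 — selection instead of sorting."""
--     prices = [r["price_idr"] for r in rows if r.get("price_idr", 0) > 0]
--     n = len(prices)
--     if n == 0:
--         return {"min": None, "max": None, "median": None, "count": 0}
--     if n % 2:
--         median = _select(prices, n // 2)
--     else:
--         median = (_select(prices, n // 2 - 1) + _select(prices, n // 2)) // 2
--     return {"min": min(prices), "max": max(prices), "median": median, "count": n}
-- ===== Notes on version B (the rewrite author's own statement) =====
-- stated objective: alternative
-- what changed: B replaces A's full sort by an iterative median-of-three quickselect for the median plus builtin min/max over the unsorted prices, so no sorted copy of the list is ever built.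
import Mathlib
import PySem

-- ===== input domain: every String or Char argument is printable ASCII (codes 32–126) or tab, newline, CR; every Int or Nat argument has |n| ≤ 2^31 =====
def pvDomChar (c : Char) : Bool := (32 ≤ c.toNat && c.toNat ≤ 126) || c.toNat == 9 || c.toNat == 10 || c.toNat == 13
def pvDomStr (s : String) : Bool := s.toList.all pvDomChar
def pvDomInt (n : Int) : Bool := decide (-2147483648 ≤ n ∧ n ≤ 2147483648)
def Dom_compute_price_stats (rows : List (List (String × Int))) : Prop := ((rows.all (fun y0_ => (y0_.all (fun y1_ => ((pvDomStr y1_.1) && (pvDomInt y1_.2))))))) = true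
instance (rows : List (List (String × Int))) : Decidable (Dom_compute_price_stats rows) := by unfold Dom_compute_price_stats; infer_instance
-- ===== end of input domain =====

-- B replaces A's full sort by an iterative median-of-three quickselect for the median plus
-- builtin min/max over the unsorted prices (alternative algorithm, no sorted copy built).

-- ===== PORT A =====
-- the filtered price list, shared shape of both Pythons' first line:
-- [r["price_idr"] for r in rows if r.get("price_idr", 0) > 0]
-- (r["price_idr"] cannot raise KeyError: the guard ensures the key is present, so `.getD 0` is never taken)
def pvPrices (rows : List (List (String × Int))) : List Int :=
  (rows.filter (fun r => PySem.Dict.getD (PySem.Dict.mk r) "price_idr" 0 > 0)).map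
    (fun r => (PySem.Dict.get? (ν := Int) (PySem.Dict.mk r) "price_idr").getD 0)

def compute_price_stats (rows : List (List (String × Int))) : List (String × Option Int) :=
  let prices := pvPrices rows
  if prices = [] then [("min", none), ("max", none), ("median", none), ("count", some 0)]
  else
    let ps := PySem.List.sorted prices (fun x => x)
    let n := ps.length
    -- indices n/2, n/2-1 and -1 are always in range (n ≥ 1; n/2-1 only read when n is even, n ≥ 2)
    let median :=
      if n % 2 ≠ 0 then (PySem.List.pyGet? ps ((n / 2 : Nat) : Int)).getD 0
      else PySem.Int.floordiv
        ((PySem.List.pyGet? ps ((n / 2 - 1 : Nat) : Int)).getD 0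
          + (PySem.List.pyGet? ps ((n / 2 : Nat) : Int)).getD 0) 2
    [("min", some ((PySem.List.pyGet? ps (0 : Int)).getD 0)),
     ("max", some ((PySem.List.pyGet? ps (-1 : Int)).getD 0)),
     ("median", some median),
     ("count", some (n : Int))]

-- ===== PORT B =====
-- median of three values: a + b + c - min - max (exactly Source B's pivot expression)
def pvMed3 (a b c : Int) : Int := a + b + c - min a (min b c) - max a (max b c)

-- pivot = med3(xs[0], xs[len(xs)//2], xs[-1]); all three indices in range for non-empty xs
def pvPivot (xs : List Int) : Int :=
  pvMed3 (xs.getD 0 0) (xs.getD (xs.length / 2) 0) (xs.getD (xs.length - 1) 0)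

theorem pvMed3_mem (a b c : Int) : pvMed3 a b c = a ∨ pvMed3 a b c = b ∨ pvMed3 a b c = c := by
  unfold pvMed3
  rcases le_total a b with h1 | h1 <;> rcases le_total b c with h2 | h2 <;>
    rcases le_total a c with h3 | h3 <;> simp [h1, h2, h3] <;> omega

theorem pvPivot_mem (xs : List Int) (h : xs ≠ []) : pvPivot xs ∈ xs := by
  have hlen : 0 < xs.length := List.length_pos_iff.mpr h
  have g : ∀ i, i < xs.length → xs.getD i 0 ∈ xs := by
    intro i hi
    rw [List.getD_eq_getElem xs 0 hi]
    exact List.getElem_mem hi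
  rcases pvMed3_mem (xs.getD 0 0) (xs.getD (xs.length / 2) 0) (xs.getD (xs.length - 1) 0)
    with e | e | e <;> unfold pvPivot <;> rw [e]
  · exact g 0 hlen
  · exact g _ (by omega)
  · exact g _ (by omega)

theorem pvFilter_lt_length (xs : List Int) (p : Int → Bool) (hx : xs ≠ [])
    (hp : ¬ p (pvPivot xs)) : (xs.filter p).length < xs.length :=
  List.length_filter_lt_length_iff_exists.mpr ⟨pvPivot xs, pvPivot_mem xs hx, hp⟩

-- the same bound in the `attach`ed form the termination checker produces
theorem pvFilterAttach_lt_length (xs : List Int) (p : Int → Bool) (hx : xs ≠ [])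
    (hp : p (pvPivot xs) = false) :
    (List.filter (fun x : {y // y ∈ xs} => p ↑x) xs.attach).length < xs.length := by
  simp only [← List.countP_eq_length_filter]
  rw [List.countP_attach (p := p), List.countP_eq_length_filter]
  exact pvFilter_lt_length xs p hx (by simp [hp])

-- iterative quickselect loop of Source B (tail recursion = the while loop)
def pvSelect (xs : List Int) (k : Nat) : Int :=
  if hx : xs = [] then 0   -- unreachable: Source B only calls _select on non-empty lists
  else if k < (xs.filter (fun x => x < pvPivot xs)).length then
    pvSelect (xs.filter (fun x => x < pvPivot xs)) k
  else if k < (xs.filter (fun x => x < pvPivot xs)).length + xs.count (pvPivot xs) then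
    pvPivot xs
  else
    pvSelect (xs.filter (fun x => pvPivot xs < x))
      (k - ((xs.filter (fun x => x < pvPivot xs)).length + xs.count (pvPivot xs)))
termination_by xs.length
decreasing_by
  · rw [List.length_unattach]
    exact pvFilterAttach_lt_length xs (fun y => decide (y < pvPivot xs)) hx (by simp)
  · rw [List.length_unattach]
    exact pvFilterAttach_lt_length xs (fun y => decide (pvPivot xs < y)) hx (by simp)

def compute_price_stats_alt (rows : List (List (String × Int))) : List (String × Option Int) :=
  let prices := pvPrices rows
  let n := prices.length
  if n = 0 then [("min", none), ("max", none), ("median", none), ("count", some 0)]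
  else
    let median :=
      if n % 2 ≠ 0 then pvSelect prices (n / 2)
      else PySem.Int.floordiv (pvSelect prices (n / 2 - 1) + pvSelect prices (n / 2)) 2
    [("min", some ((PySem.List.min? prices (fun x => x)).getD 0)),
     ("max", some ((PySem.List.max? prices (fun x => x)).getD 0)),
     ("median", some median),
     ("count", some (n : Int))]

-- ===== PRECONDITION & SPEC =====
def Spec_compute_price_stats (rows : List (List (String × Int))) (out : List (String × Option Int)) : Prop := out = compute_price_stats_alt rows
instance (rows : List (List (String × Int))) (out : List (String × Option Int)) : Decidable (Spec_compute_price_stats rows out) := by unfold Spec_compute_price_stats; infer_instance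

-- ===== CLAIM (what is proved, stated in full; the proofs are below) =====
def Claim_equal_compute_price_stats : Prop := ∀ (rows : List (List (String × Int))), Dom_compute_price_stats rows → Spec_compute_price_stats rows (compute_price_stats rows)

-- ===== LEMMAS AND PROOFS =====

-- reference quicksort with the same pivot/partition as pvSelect (proof-only helper)
def pvQsort (xs : List Int) : List Int :=
  if hx : xs = [] then []
  else
    pvQsort (xs.filter (fun x => x < pvPivot xs)) ++ xs.filter (fun x => x == pvPivot xs)
      ++ pvQsort (xs.filter (fun x => pvPivot xs < x))
termination_by xs.length
decreasing_by
  · rw [List.length_unattach]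
    exact pvFilterAttach_lt_length xs (fun y => decide (y < pvPivot xs)) hx (by simp)
  · rw [List.length_unattach]
    exact pvFilterAttach_lt_length xs (fun y => decide (pvPivot xs < y)) hx (by simp)

theorem count_filter_lt (l : List Int) (a p : Int) :
    (l.filter (fun x => decide (x < p))).count a = if a < p then l.count a else 0 := by
  by_cases h : a < p
  · rw [if_pos h, List.count_filter (by simp [h])]
  · rw [if_neg h, List.count_eq_zero.mpr (by simp [h])]

theorem count_filter_gt (l : List Int) (a p : Int) :
    (l.filter (fun x => decide (p < x))).count a = if p < a then l.count a else 0 := by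
  by_cases h : p < a
  · rw [if_pos h, List.count_filter (by simp [h])]
  · rw [if_neg h, List.count_eq_zero.mpr (by simp [h])]

theorem count_filter_eq (l : List Int) (a p : Int) :
    (l.filter (fun x => x == p)).count a = if a = p then l.count a else 0 := by
  by_cases h : a = p
  · rw [if_pos h, List.count_filter (by simp [h])]
  · rw [if_neg h, List.count_eq_zero.mpr (by simp [h])]

theorem pvQsort_perm_aux (n : Nat) : ∀ xs : List Int, xs.length ≤ n → (pvQsort xs).Perm xs := by
  induction n with
  | zero =>
    intro xs h
    have hx : xs = [] := List.eq_nil_of_length_eq_zero (by omega)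
    simp [hx, pvQsort]
  | succ n ih =>
    intro xs h
    by_cases hx : xs = []
    · simp [hx, pvQsort]
    · have hlt := pvFilter_lt_length xs (fun x => decide (x < pvPivot xs)) hx (by simp)
      have hgt := pvFilter_lt_length xs (fun x => decide (pvPivot xs < x)) hx (by simp)
      rw [pvQsort, dif_neg hx]
      refine List.perm_iff_count.mpr (fun a => ?_)
      rw [List.count_append, List.count_append,
        (ih _ (by omega)).count_eq, (ih _ (by omega)).count_eq,
        count_filter_lt, count_filter_eq, count_filter_gt]
      rcases lt_trichotomy a (pvPivot xs) with h' | h' | h' <;>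
        simp [h', not_lt_of_gt, ne_of_gt, ne_of_lt]

theorem pvQsort_perm (xs : List Int) : (pvQsort xs).Perm xs :=
  pvQsort_perm_aux xs.length xs le_rfl

theorem pvQsort_length (xs : List Int) : (pvQsort xs).length = xs.length :=
  (pvQsort_perm xs).length_eq

theorem pvQsort_pairwise_aux (n : Nat) :
    ∀ xs : List Int, xs.length ≤ n → (pvQsort xs).Pairwise (· ≤ ·) := by
  induction n with
  | zero =>
    intro xs h
    have hx : xs = [] := List.eq_nil_of_length_eq_zero (by omega)
    simp [hx, pvQsort]
  | succ n ih =>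
    intro xs h
    by_cases hx : xs = []
    · simp [hx, pvQsort]
    · have hlt := pvFilter_lt_length xs (fun x => decide (x < pvPivot xs)) hx (by simp)
      have hgt := pvFilter_lt_length xs (fun x => decide (pvPivot xs < x)) hx (by simp)
      rw [pvQsort, dif_neg hx]
      rw [List.append_assoc, List.pairwise_append]
      refine ⟨ih _ (by omega), ?_, ?_⟩
      · rw [List.pairwise_append]
        refine ⟨List.pairwise_of_forall_mem_list ?_, ih _ (by omega), ?_⟩
        · intro a ha b hb
          have ha' : a = pvPivot xs := by simpa using (List.mem_filter.mp ha).2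
          have hb' : b = pvPivot xs := by simpa using (List.mem_filter.mp hb).2
          omega
        · intro x hxm y hym
          have hx' : x = pvPivot xs := by simpa using (List.mem_filter.mp hxm).2
          have hy' : pvPivot xs < y := by
            have := (List.mem_filter.mp ((pvQsort_perm _).mem_iff.mp hym)).2
            simpa using this
          omega
      · intro x hxm y hym
        have hx' : x < pvPivot xs := by
          have := (List.mem_filter.mp ((pvQsort_perm _).mem_iff.mp hxm)).2
          simpa using this
        rcases List.mem_append.mp hym with hy | hy
        · have : y = pvPivot xs := by simpa using (List.mem_filter.mp hy).2
          omega
        · have : pvPivot xs < y := by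
            have := (List.mem_filter.mp ((pvQsort_perm _).mem_iff.mp hy)).2
            simpa using this
          omega

theorem pvQsort_pairwise (xs : List Int) : (pvQsort xs).Pairwise (· ≤ ·) :=
  pvQsort_pairwise_aux xs.length xs le_rfl

theorem getD_of_all_eq (l : List Int) (p : Int) (i : Nat)
    (hall : ∀ x ∈ l, x = p) (hi : i < l.length) : l.getD i 0 = p := by
  rw [List.getD_eq_getElem _ _ hi]
  exact hall _ (List.getElem_mem hi)

theorem pvSelect_eq_aux (n : Nat) :
    ∀ (xs : List Int) (k : Nat), xs.length ≤ n → k < xs.length →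
      pvSelect xs k = (pvQsort xs).getD k 0 := by
  induction n with
  | zero => intro xs k h hk; omega
  | succ n ih =>
    intro xs k h hk
    have hx : xs ≠ [] := by intro e; simp [e] at hk
    have hltl := pvFilter_lt_length xs (fun x => decide (x < pvPivot xs)) hx (by simp)
    have hgtl := pvFilter_lt_length xs (fun x => decide (pvPivot xs < x)) hx (by simp)
    set p := pvPivot xs with hp
    set lt := xs.filter (fun x => decide (x < p)) with hlt
    set eqf := xs.filter (fun x => x == p) with heqf
    set gt := xs.filter (fun x => decide (p < x)) with hgt
    have heqlen : eqf.length = xs.count p := by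
      rw [heqf, ← List.countP_eq_length_filter]; rfl
    have hsum : lt.length + eqf.length + gt.length = xs.length := by
      have hq := pvQsort_length xs
      rw [pvQsort, dif_neg hx] at hq
      simp only [List.length_append, pvQsort_length, ← hp, ← hlt, ← heqf, ← hgt] at hq
      omega
    rw [pvSelect, dif_neg hx, pvQsort, dif_neg hx, ← hp, ← hlt, ← heqf, ← hgt]
    by_cases h1 : k < lt.length
    · rw [if_pos h1, List.append_assoc,
        List.getD_append _ _ _ _ (by rw [pvQsort_length]; exact h1)]
      exact ih lt k (by omega) h1
    · rw [if_neg h1]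
      by_cases h2 : k < lt.length + xs.count p
      · rw [if_pos h2, List.getD_append _ _ _ _
          (by rw [List.length_append, pvQsort_length]; omega),
          List.getD_append_right _ _ _ _ (by rw [pvQsort_length]; omega)]
        rw [pvQsort_length]
        exact (getD_of_all_eq eqf p _
          (fun x hxm => by simpa using (List.mem_filter.mp hxm).2) (by omega)).symm
      · rw [if_neg h2,
          List.getD_append_right _ _ _ _
            (by rw [List.length_append, pvQsort_length]; omega)]
        have hlt3 : k - (lt.length + xs.count p) < gt.length := by omega
        have hih := ih gt (k - (lt.length + xs.count p)) (by omega) hlt3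
        rw [List.length_append, pvQsort_length, ← heqlen]
        convert hih using 3 <;> omega

theorem pvSelect_eq (xs : List Int) (k : Nat) (hk : k < xs.length) :
    pvSelect xs k = (pvQsort xs).getD k 0 :=
  pvSelect_eq_aux xs.length xs k le_rfl hk

theorem sorted_eq_pvQsort (xs : List Int) :
    PySem.List.sorted xs (fun x => x) = pvQsort xs :=
  PySem.List.sorted_id_eq_of_perm_of_pairwise xs (pvQsort xs) (pvQsort_perm xs) (pvQsort_pairwise xs)

theorem pyGet_natCast_getD (l : List Int) (k : Nat) (h : k < l.length) :
    (PySem.List.pyGet? l ((k : Nat) : Int)).getD 0 = l.getD k 0 := by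
  rw [PySem.List.pyGet?_natCast]
  simp [List.getD]

theorem pyGet_zero_getD (l : List Int) : (PySem.List.pyGet? l 0).getD 0 = l.getD 0 0 := by
  have : (0 : Int) = ((0 : Nat) : Int) := rfl
  rw [this, PySem.List.pyGet?_natCast]
  simp [List.getD]

theorem pyGet_neg_one_getD (l : List Int) (h : l ≠ []) :
    (PySem.List.pyGet? l (-1)).getD 0 = l.getD (l.length - 1) 0 := by
  have h1 : 1 ≤ l.length := by cases l <;> simp_all
  have h2 : l.length - 1 < l.length := by omega
  simp [PySem.List.pyGet?, PySem.List.pyIdx?, List.getD, h1, List.getElem?_eq_getElem h2]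

-- a sorted permutation's first element is min(xs), its last is max(xs)
theorem qsort_getD_mem (xs : List Int) (k : Nat) (hk : k < xs.length) :
    (pvQsort xs).getD k 0 ∈ xs := by
  have hk' : k < (pvQsort xs).length := by rw [pvQsort_length]; exact hk
  rw [List.getD_eq_getElem _ _ hk']
  exact (pvQsort_perm xs).mem_iff.mp (List.getElem_mem hk')

theorem qsort_getD_le (xs : List Int) (i j : Nat) (hij : i ≤ j) (hj : j < xs.length) :
    (pvQsort xs).getD i 0 ≤ (pvQsort xs).getD j 0 := by
  have hj' : j < (pvQsort xs).length := by rw [pvQsort_length]; exact hj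
  have hi' : i < (pvQsort xs).length := by omega
  rw [List.getD_eq_getElem _ _ hi', List.getD_eq_getElem _ _ hj']
  rcases Nat.eq_or_lt_of_le hij with rfl | hlt
  · exact le_rfl
  · exact List.pairwise_iff_getElem.mp (pvQsort_pairwise xs) i j hi' hj' hlt

theorem min?_eq_qsort_head (xs : List Int) (hx : xs ≠ []) :
    (PySem.List.min? xs (fun x => x)).getD 0 = (pvQsort xs).getD 0 0 := by
  have hlen : 0 < xs.length := List.length_pos_iff.mpr hx
  rcases e : PySem.List.min? xs (fun x => x) with _ | m
  · exact absurd ((PySem.List.min?_eq_none_iff xs _).mp e) hx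
  · have hmem : (pvQsort xs).getD 0 0 ∈ xs := qsort_getD_mem xs 0 hlen
    have h1 : m ≤ (pvQsort xs).getD 0 0 := PySem.List.min?_isMin e _ hmem
    have h2 : (pvQsort xs).getD 0 0 ≤ m := by
      have hm : m ∈ pvQsort xs := (pvQsort_perm xs).mem_iff.mpr (PySem.List.min?_mem e)
      obtain ⟨j, hj, hje⟩ := List.mem_iff_getElem.mp hm
      rw [← List.getD_eq_getElem _ 0 hj] at hje
      rw [← hje]
      exact qsort_getD_le xs 0 j (by omega) (by rw [← pvQsort_length xs]; exact hj)
    simpa using (le_antisymm h2 h1).symm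

theorem max?_eq_qsort_last (xs : List Int) (hx : xs ≠ []) :
    (PySem.List.max? xs (fun x => x)).getD 0 = (pvQsort xs).getD (xs.length - 1) 0 := by
  have hlen : 0 < xs.length := List.length_pos_iff.mpr hx
  rcases e : PySem.List.max? xs (fun x => x) with _ | m
  · exact absurd ((PySem.List.max?_eq_none_iff xs _).mp e) hx
  · have hmem : (pvQsort xs).getD (xs.length - 1) 0 ∈ xs := qsort_getD_mem xs _ (by omega)
    have h1 : (pvQsort xs).getD (xs.length - 1) 0 ≤ m := PySem.List.max?_isMax e _ hmem
    have h2 : m ≤ (pvQsort xs).getD (xs.length - 1) 0 := by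
      have hm : m ∈ pvQsort xs := (pvQsort_perm xs).mem_iff.mpr (PySem.List.max?_mem e)
      obtain ⟨j, hj, hje⟩ := List.mem_iff_getElem.mp hm
      rw [← List.getD_eq_getElem _ 0 hj] at hje
      rw [← hje]
      exact qsort_getD_le xs j (xs.length - 1) (by rw [pvQsort_length] at hj; omega) (by omega)
    simpa using (le_antisymm h1 h2).symm

-- ===== VERDICT (by name: the statement is the Claim_ definition above) =====
theorem compute_price_stats_spec : Claim_equal_compute_price_stats := by
  intro rows _
  simp only [Spec_compute_price_stats, compute_price_stats, compute_price_stats_alt]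
  by_cases hnil : pvPrices rows = []
  · simp [hnil]
  · have hlen : 0 < (pvPrices rows).length := List.length_pos_iff.mpr hnil
    have hq : pvQsort (pvPrices rows) ≠ [] := by
      intro e
      have := pvQsort_length (pvPrices rows)
      rw [e] at this
      simp at this
      omega
    have hn0 : ¬ (pvPrices rows).length = 0 := by omega
    simp only [sorted_eq_pvQsort, hnil, hn0, if_false, pvQsort_length,
      List.cons.injEq, Prod.mk.injEq, Option.some.injEq, and_true, true_and]
    refine ⟨?_, ?_, ?_⟩
    · rw [pyGet_zero_getD, min?_eq_qsort_head _ hnil]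
    · rw [pyGet_neg_one_getD _ hq, pvQsort_length, max?_eq_qsort_last _ hnil]
    · by_cases hpar : (pvPrices rows).length % 2 ≠ 0
      · simp only [if_pos hpar]
        rw [pyGet_natCast_getD _ _ (by rw [pvQsort_length]; omega),
          pvSelect_eq _ _ (by omega)]
      · simp only [if_neg hpar]
        rw [pyGet_natCast_getD _ _ (by rw [pvQsort_length]; omega),
          pyGet_natCast_getD _ _ (by rw [pvQsort_length]; omega),
          pvSelect_eq _ _ (by omega), pvSelect_eq _ _ (by omega)]
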